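-- pv_equiv track=rewrite | github.com/vispet/4k-interieur_2 | project/utilities/columnizer.py | _can_apply_pattern
-- ===== SOURCE A (Python) =====
-- def _can_apply_pattern(pattern, item_count):
--     """
--     Return true if pattern match, false otherwise
--     """
--     pattern_idx = 0
--     while(item_count > 0):
--         item_count -= pattern[pattern_idx]
--         pattern_idx += 1
--         if pattern_idx >= len(pattern):
--             pattern_idx = 0
--
--     return True if item_count == 0 else False
-- ===== SOURCE B (Python) =====
-- def _can_apply_pattern(pattern, item_count):
--     """
--     Return true if pattern match, false otherwise
--     """
--     if item_count <= 0:
--         return item_count == 0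
--     prefixes = []
--     s = 0
--     for x in pattern:
--         s += x
--         prefixes.append(s)
--     m = max(prefixes)
--     if s > 0 and item_count > m:
--         # skip the full cycles that cannot stop the loop:
--         # k = ceil((item_count - m) / s) full cycles, each subtracting s
--         k = -((m - item_count) // s)
--         item_count -= k * s
--     for p in prefixes:
--         if item_count <= p:
--             return item_count == p
--     return False
-- ===== Notes on version B (the rewrite author's own statement) =====
-- stated objective: alternative
-- what changed: A subtracts pattern elements one at a time in a cyclic loop until item_count drops to <= 0; B computes the prefix sums once, skips all full cycles at once with a single ceiling division by the pattern's total, then scans the prefix sums for the first one reaching item_count.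
import Mathlib
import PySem

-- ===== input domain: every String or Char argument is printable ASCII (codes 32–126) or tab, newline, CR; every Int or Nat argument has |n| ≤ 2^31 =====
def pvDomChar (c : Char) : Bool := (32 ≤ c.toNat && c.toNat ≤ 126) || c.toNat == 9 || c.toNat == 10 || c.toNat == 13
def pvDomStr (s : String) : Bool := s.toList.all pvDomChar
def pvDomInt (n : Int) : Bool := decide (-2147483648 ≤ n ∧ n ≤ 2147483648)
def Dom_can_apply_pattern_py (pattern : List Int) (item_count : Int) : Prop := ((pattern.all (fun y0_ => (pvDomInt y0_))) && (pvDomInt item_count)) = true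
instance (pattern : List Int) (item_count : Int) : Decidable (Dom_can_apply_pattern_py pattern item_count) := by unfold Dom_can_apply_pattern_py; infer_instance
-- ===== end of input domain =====

-- B replaces A's one-subtraction-at-a-time cyclic loop by a single ceiling-division jump over
-- the full cycles plus one scan of the prefix sums (an alternative algorithm, same return value).

-- ===== PORT A =====
-- A's while-loop, fuel-guarded for totality only: on every input admitted by Pre_ the fuel
-- bound (item_count.toNat + 2) * (len + 1) strictly exceeds the number of iterations the
-- Python loop performs (proved implicitly by the equivalence proof below), so the fuel-0
-- branch is never taken there.  `getD idx 0`: the index is always in range when the loop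
-- body runs on admitted inputs (Python raises IndexError only for pattern = [], excluded).
def aLoop (pattern : List Int) : Nat → Int → Nat → Bool
  | 0, item_count, _ => item_count == 0
  | fuel + 1, item_count, pattern_idx =>
    if item_count > 0 then
      let item_count' := item_count - pattern.getD pattern_idx 0
      let idx' := pattern_idx + 1
      aLoop pattern fuel item_count' (if pattern.length ≤ idx' then 0 else idx')
    else item_count == 0

def can_apply_pattern_py (pattern : List Int) (item_count : Int) : Bool :=
  aLoop pattern ((item_count.toNat + 2) * (pattern.length + 1)) item_count 0

-- ===== PORT B =====
-- prefix sums of the pattern (Source B's `prefixes` list)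
def psList : List Int → List Int
  | [] => []
  | x :: r => x :: (psList r).map (fun p => x + p)

-- Source B's final loop: first prefix sum p with v ≤ p decides, else False
def bScan : List Int → Int → Bool
  | [], _ => false
  | p :: rest, v => if v ≤ p then v == p else bScan rest v

def can_apply_pattern_py_alt (pattern : List Int) (item_count : Int) : Bool :=
  if item_count ≤ 0 then item_count == 0
  else
    match PySem.List.max? (psList pattern) (fun p => p) with
    | none => false    -- Source B raises ValueError here (max of empty list); outside Pre_
    | some m =>
      let s := pattern.sum
      let v :=
        if 0 < s ∧ m < item_count then
          item_count - (-(PySem.Int.floordiv (m - item_count) s)) * s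
        else item_count
      bScan (psList pattern) v

-- ===== PRECONDITION & SPEC =====
-- Pre_ excludes exactly the inputs where the Python A does not return: pattern = [] with
-- item_count > 0 (IndexError, B raises ValueError there too), and item_count > 0 with no
-- prefix sum reaching item_count and nonpositive total (A's loop never terminates).
def Pre_can_apply_pattern_py (pattern : List Int) (item_count : Int) : Prop :=
  item_count ≤ 0 ∨
    (pattern ≠ [] ∧
      ((∃ n < pattern.length, item_count ≤ (pattern.take (n + 1)).sum) ∨ 0 < pattern.sum))
instance (pattern : List Int) (item_count : Int) : Decidable (Pre_can_apply_pattern_py pattern item_count) := by unfold Pre_can_apply_pattern_py; infer_instance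

def pvWitness_can_apply_pattern_py : List Int × Int := ([2, 1], 5)

def Spec_can_apply_pattern_py (pattern : List Int) (item_count : Int) (out : Bool) : Prop := out = can_apply_pattern_py_alt pattern item_count
instance (pattern : List Int) (item_count : Int) (out : Bool) : Decidable (Spec_can_apply_pattern_py pattern item_count out) := by unfold Spec_can_apply_pattern_py; infer_instance

-- ===== CLAIM (what is proved, stated in full; the proofs are below) =====
def Claim_equal_can_apply_pattern_py : Prop := ∀ (pattern : List Int) (item_count : Int), Dom_can_apply_pattern_py pattern item_count → Pre_can_apply_pattern_py pattern item_count → Spec_can_apply_pattern_py pattern item_count (can_apply_pattern_py pattern item_count)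

-- ===== LEMMAS AND PROOFS =====

-- the value of one pass of A's loop through the suffix `l` (continuation k = rest of the run)
def cycleRes : List Int → Int → Bool → Bool
  | [], v, k => if v ≤ 0 then v == 0 else k
  | x :: r, v, k => if v ≤ 0 then v == 0 else cycleRes r (v - x) k

theorem aLoop_nonpos (p : List Int) (f : Nat) (v : Int) (i : Nat) (h : v ≤ 0) :
    aLoop p f v i = (v == 0) := by
  cases f <;> simp [aLoop, show ¬ v > 0 by omega]

theorem cycleRes_nonpos (l : List Int) (v : Int) (k : Bool) (h : v ≤ 0) :
    cycleRes l v k = (v == 0) := by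
  cases l <;> simp [cycleRes, h]

-- one pass of A's loop through the tail of the pattern, starting at index pre.length
theorem aLoop_cycle (rest : List Int) : ∀ (x : Int) (pre : List Int) (fuel : Nat) (v : Int),
    rest.length + 1 ≤ fuel →
    aLoop (pre ++ x :: rest) fuel v pre.length
      = cycleRes (x :: rest) v
          (aLoop (pre ++ x :: rest) (fuel - (rest.length + 1)) (v - (x :: rest).sum) 0) := by
  induction rest with
  | nil =>
    intro x pre fuel v hf
    obtain ⟨f, rfl⟩ : ∃ f, fuel = f + 1 := ⟨fuel - 1, by omega⟩
    by_cases hv : v ≤ 0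
    · rw [aLoop_nonpos _ _ _ _ hv]
      simp [cycleRes, hv]
    · simp only [aLoop, if_pos (show v > 0 by omega)]
      have hget : (pre ++ x :: ([] : List Int)).getD pre.length 0 = x := by
        simp [List.getD_eq_getElem?_getD]
      rw [hget]
      rw [if_pos (by simp)]
      simp only [cycleRes, if_neg hv, List.sum_cons, List.sum_nil, add_zero]
      by_cases hvx : v - x ≤ 0
      · rw [aLoop_nonpos _ _ _ _ hvx, if_pos hvx]
      · rw [if_neg hvx]
        simp
  | cons y rest' ih =>
    intro x pre fuel v hf
    obtain ⟨f, rfl⟩ : ∃ f, fuel = f + 1 := ⟨fuel - 1, by omega⟩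
    by_cases hv : v ≤ 0
    · rw [aLoop_nonpos _ _ _ _ hv]
      simp [cycleRes, hv]
    · simp only [aLoop, if_pos (show v > 0 by omega)]
      have hget : (pre ++ x :: y :: rest').getD pre.length 0 = x := by
        simp [List.getD_eq_getElem?_getD]
      rw [hget]
      rw [if_neg (by simp)]
      have hre : pre ++ x :: y :: rest' = (pre ++ [x]) ++ y :: rest' := by simp
      have hlen : pre.length + 1 = (pre ++ [x]).length := by simp
      rw [hre, hlen, ih y (pre ++ [x]) f (v - x) (by simp only [List.length_cons] at hf; omega : rest'.length + 1 ≤ f)]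
      simp only [cycleRes, if_neg hv]
      have h1 : f - (rest'.length + 1) = f + 1 - ((y :: rest').length + 1) := by
        simp only [List.length_cons]; omega
      have h2 : v - x - (y :: rest').sum = v - (x :: y :: rest').sum := by
        simp only [List.sum_cons]; ring
      rw [h1, h2]

-- A's loop from index 0 = one cycle + continuation
theorem aLoop_cycle0 (x : Int) (rest : List Int) (fuel : Nat) (v : Int)
    (h : (x :: rest).length ≤ fuel) :
    aLoop (x :: rest) fuel v 0
      = cycleRes (x :: rest) v
          (aLoop (x :: rest) (fuel - (x :: rest).length) (v - (x :: rest).sum) 0) := by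
  simpa using aLoop_cycle rest x [] fuel v (by simpa using h)

theorem cycleRes_skip (l : List Int) : ∀ (v : Int) (k : Bool), 0 < v →
    (∀ p ∈ psList l, p < v) → cycleRes l v k = k := by
  induction l with
  | nil => intro v k hv _; simp [cycleRes, show ¬ v ≤ 0 by omega]
  | cons x r ih =>
    intro v k hv hall
    have hx : x < v := hall x (by simp [psList])
    simp only [cycleRes, if_neg (show ¬ v ≤ 0 by omega)]
    refine ih (v - x) k (by omega) (fun p hp => ?_)
    have := hall (x + p) (by
      simp only [psList, List.mem_cons, List.mem_map]
      exact Or.inr ⟨p, hp, rfl⟩)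
    omega

theorem bScan_map (l : List Int) : ∀ (a v : Int),
    bScan (l.map (fun p => a + p)) v = bScan l (v - a) := by
  induction l with
  | nil => intro a v; simp [bScan]
  | cons p r ih =>
    intro a v
    simp only [List.map_cons, bScan]
    by_cases h : v ≤ a + p
    · simp [h, show v - a ≤ p by omega]
      constructor <;> (intro h'; omega)
    · simp [h, show ¬ (v - a ≤ p) by omega, ih]

theorem cycleRes_hit (l : List Int) : ∀ (v : Int) (k : Bool), 0 < v →
    (∃ p ∈ psList l, v ≤ p) → cycleRes l v k = bScan (psList l) v := by
  induction l with
  | nil => intro v k _ h; simp [psList] at h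
  | cons x r ih =>
    intro v k hv hex
    simp only [cycleRes, psList, bScan, if_neg (show ¬ v ≤ 0 by omega)]
    by_cases hx : v ≤ x
    · rw [if_pos hx, cycleRes_nonpos r (v - x) k (by omega)]
      by_cases h' : v = x
      · simp [h']
      · simp [h', show v - x ≠ 0 by omega]
    · rw [if_neg hx, bScan_map, ih (v - x) k (by omega)]
      obtain ⟨p, hp, hvp⟩ := hex
      simp only [psList, List.mem_cons, List.mem_map] at hp
      rcases hp with rfl | ⟨q, hq, rfl⟩
      · omega
      · exact ⟨q, hq, by omega⟩

theorem sum_mem_psList (l : List Int) (h : l ≠ []) : l.sum ∈ psList l := by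
  induction l with
  | nil => simp at h
  | cons x r ih =>
    cases r with
    | nil => simp [psList]
    | cons y r' =>
      have ih' := ih (by simp)
      rw [show psList (x :: y :: r') = x :: (psList (y :: r')).map (fun p => x + p) from rfl]
      exact List.mem_cons_of_mem _ (List.mem_map.mpr ⟨(y :: r').sum, ih', by simp [List.sum_cons]⟩)

-- the members of psList are exactly the sums of the nonempty prefixes
theorem mem_psList_iff (l : List Int) : ∀ p : Int,
    p ∈ psList l ↔ ∃ n, n < l.length ∧ p = (l.take (n + 1)).sum := by
  induction l with
  | nil => intro p; simp [psList]
  | cons x r ih =>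
    intro p
    simp only [psList, List.mem_cons, List.mem_map, ih]
    constructor
    · rintro (rfl | ⟨q, ⟨n, hn, rfl⟩, rfl⟩)
      · exact ⟨0, by simp⟩
      · exact ⟨n + 1, by simpa using hn, by simp⟩
    · rintro ⟨n, hn, rfl⟩
      cases n with
      | zero => left; simp
      | succ n =>
        right
        exact ⟨(r.take (n + 1)).sum, ⟨n, by simpa using hn, rfl⟩, by simp⟩

theorem psList_ne_nil (l : List Int) (h : l ≠ []) : psList l ≠ [] := by
  cases l <;> simp_all [psList]

-- skipping k full cycles that cannot stop the loop
theorem aLoop_iter (x : Int) (rest : List Int) (m : Int)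
    (hmax : ∀ p ∈ psList (x :: rest), p ≤ m) (hs : 0 < (x :: rest).sum) :
    ∀ (k : Nat) (fuel : Nat) (v : Int),
    (∀ i : Nat, i < k → m < v - (i : Int) * (x :: rest).sum) →
    k * (x :: rest).length ≤ fuel →
    aLoop (x :: rest) fuel v 0
      = aLoop (x :: rest) (fuel - k * (x :: rest).length) (v - (k : Int) * (x :: rest).sum) 0 := by
  intro k
  induction k with
  | zero => intro fuel v _ _; simp
  | succ k ih =>
    intro fuel v hgt hfuel
    have hsm : (x :: rest).sum ≤ m := hmax _ (sum_mem_psList _ (by simp))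
    have hmv : m < v := by simpa using hgt 0 (by omega)
    have hv : 0 < v := by omega
    rw [aLoop_cycle0 x rest fuel v (by
      have := Nat.le_mul_of_pos_left (x :: rest).length (show 0 < k + 1 by omega)
      omega)]
    rw [cycleRes_skip _ v _ hv (fun p hp => by have := hmax p hp; omega)]
    rw [ih (fuel - (x :: rest).length) (v - (x :: rest).sum)
      (fun i hi => by
        have := hgt (i + 1) (by omega)
        push_cast at this ⊢
        linarith)
      (by rw [Nat.succ_mul] at hfuel; omega)]
    have h1 : fuel - (x :: rest).length - k * (x :: rest).length
        = fuel - (k + 1) * (x :: rest).length := by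
      rw [Nat.succ_mul]; omega
    have h2 : v - (x :: rest).sum - (k : Int) * (x :: rest).sum
        = v - ((k + 1 : Nat) : Int) * (x :: rest).sum := by
      push_cast; ring
    rw [h1, h2]

-- ===== VERDICT (by name: the statement is the Claim_ definition above) =====
theorem can_apply_pattern_py_spec : Claim_equal_can_apply_pattern_py := by
  intro pattern v _hdom hpre
  unfold Spec_can_apply_pattern_py can_apply_pattern_py can_apply_pattern_py_alt
  by_cases hv : v ≤ 0
  · rw [aLoop_nonpos _ _ _ _ hv, if_pos hv]
  · rw [if_neg hv]
    have hv0 : 0 < v := by omega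
    rcases hpre with h | ⟨hne, hcases0⟩
    · omega
    obtain ⟨x, rest, rfl⟩ := List.exists_cons_of_ne_nil hne
    have hcases : (∃ p ∈ psList (x :: rest), v ≤ p) ∨ 0 < (x :: rest).sum := by
      rcases hcases0 with ⟨n, hn, hvp⟩ | hs
      · exact Or.inl ⟨_, (mem_psList_iff _ _).mpr ⟨n, hn, rfl⟩, hvp⟩
      · exact Or.inr hs
    cases hm : PySem.List.max? (psList (x :: rest)) (fun p => p) with
    | none => exact absurd ((PySem.List.max?_eq_none_iff _ _).mp hm) (psList_ne_nil _ (by simp))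
    | some m =>
      have hmem : m ∈ psList (x :: rest) := PySem.List.max?_mem hm
      have hmax : ∀ p ∈ psList (x :: rest), p ≤ m := by
        simpa using PySem.List.max?_isMax hm
      have hsm : (x :: rest).sum ≤ m := hmax _ (sum_mem_psList _ (by simp))
      show aLoop (x :: rest) ((v.toNat + 2) * ((x :: rest).length + 1)) v 0
        = bScan (psList (x :: rest))
            (if 0 < (x :: rest).sum ∧ m < v then
              v - -PySem.Int.floordiv (m - v) (x :: rest).sum * (x :: rest).sum
            else v)
      by_cases hcond : 0 < (x :: rest).sum ∧ m < v
      · -- jump case: skip the full cycles in one ceiling division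
        obtain ⟨hs, hmv⟩ := hcond
        rw [if_pos ⟨hs, hmv⟩]
        have hqr := PySem.Int.floordiv_mul_add_mod (m - v) (x :: rest).sum
        have hr0 : 0 ≤ PySem.Int.mod (m - v) (x :: rest).sum := PySem.Int.mod_nonneg _ hs
        have hrs : PySem.Int.mod (m - v) (x :: rest).sum < (x :: rest).sum :=
          PySem.Int.mod_lt _ hs
        -- abbreviate
        generalize hq_def : PySem.Int.floordiv (m - v) (x :: rest).sum = q at *
        generalize hr_def : PySem.Int.mod (m - v) (x :: rest).sum = r at *
        have hv' : v - (-q) * (x :: rest).sum = m - r := by linear_combination hqr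
        have hk1 : 1 ≤ -q := by
          by_contra hq0
          have : (-q) * (x :: rest).sum ≤ 0 :=
            mul_nonpos_of_nonpos_of_nonneg (by omega) (le_of_lt hs)
          linarith
        have hkv : -q ≤ v - 1 := by
          have h1 : -q ≤ (-q) * (x :: rest).sum :=
            le_mul_of_one_le_right (by omega) (by omega)
          linarith
        have hkn : ((-q).toNat : Int) = -q := Int.toNat_of_nonneg (by omega)
        have hknv : (-q).toNat + 1 ≤ v.toNat := by omega
        have hbig : ((-q).toNat + 1) * (x :: rest).length
            ≤ (v.toNat + 2) * ((x :: rest).length + 1) :=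
          calc ((-q).toNat + 1) * (x :: rest).length
              ≤ ((-q).toNat + 1) * ((x :: rest).length + 1) :=
                Nat.mul_le_mul_left _ (by omega)
            _ ≤ (v.toNat + 2) * ((x :: rest).length + 1) :=
                Nat.mul_le_mul_right _ (by omega)
        rw [aLoop_iter x rest m hmax hs (-q).toNat _ v
          (fun i hi => by
            have hiq : (i : Int) + 1 ≤ -q := by omega
            have h2 : (1 : Int) * (x :: rest).sum ≤ (-q - i) * (x :: rest).sum :=
              mul_le_mul_of_nonneg_right (by omega) (le_of_lt hs)
            have h3 : v - (i : Int) * (x :: rest).sum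
                = (v - (-q) * (x :: rest).sum) + (-q - (i : Int)) * (x :: rest).sum := by ring
            rw [hv'] at h3
            linarith)
          (by rw [Nat.succ_mul] at hbig; omega)]
        have hvv : v - ((-q).toNat : Int) * (x :: rest).sum = m - r := by rw [hkn]; exact hv'
        rw [aLoop_cycle0 x rest _ _ (by rw [Nat.succ_mul] at hbig; omega),
          cycleRes_hit _ _ _ (by omega) ⟨m, hmem, by omega⟩, hvv, ← hv']
      · rw [if_neg hcond]
        have hvm : v ≤ m := by
          rcases hcases with ⟨p, hp, hvp⟩ | hs
          · exact le_trans hvp (hmax p hp)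
          · by_contra h; exact hcond ⟨hs, by omega⟩
        have hfuel : (x :: rest).length ≤ (v.toNat + 2) * ((x :: rest).length + 1) := by
          have := Nat.mul_le_mul_right ((x :: rest).length + 1) (show 2 ≤ v.toNat + 2 by omega)
          omega
        rw [aLoop_cycle0 x rest _ _ hfuel, cycleRes_hit _ _ _ hv0 ⟨m, hmem, hvm⟩]
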